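-- pv_equiv track=rewrite | github.com/Madan000Basnet/Conversational-agent-for-PP | pp-agent-lite/pp.py | _clean_resources
-- ===== SOURCE A (Python) =====
-- from typing import Dict, Any, Tuple, List, Optional
--
-- _RES_CANDIDATES = ["oven", "labor", "mixer", "packaging", "machine", "line", "worker", "staff"]
--
-- def _clean_resources(items: List[str]) -> List[str]:
--     if not items: return []
--     vocab = set(_RES_CANDIDATES)
--     out=[]
--     for it in items:
--         tok = it.strip().lower()
--         if tok.endswith("s") and tok[:-1] in vocab: tok = tok[:-1]
--         if tok in vocab and len(tok) <= 20 and len(tok.split()) <= 2: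
--             out.append(tok)
--     canon = ["oven","labor","mixer","packaging","line","machine","worker","staff"]
--     ordered = [r for r in canon if r in out]
--     for r in out:
--         if r not in ordered: ordered.append(r)
--     return ordered
-- ===== SOURCE B (Python) =====
-- # B: collect surviving tokens into a set, then sort once by a precomputed rank
-- # table instead of scanning the canon list and running a dedup-append loop.
-- _CANON = ["oven", "labor", "mixer", "packaging", "line", "machine", "worker", "staff"]
-- _RANK = {w: i for i, w in enumerate(_CANON)}
--
-- def _clean_resources(items):
--     present = set()
--     for it in items:
--         tok = it.strip().lower()
--         if tok.endswith("s") and tok[:-1] in _RANK: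
--             tok = tok[:-1]
--         if tok in _RANK:
--             present.add(tok)
--     return sorted(present, key=lambda w: _RANK[w])
-- ===== Notes on version B (the rewrite author's own statement) =====
-- stated objective: alternative
-- what changed: B drops A's ordered out-list, canon-scan filter and dedup-append loop: it collects surviving tokens into a set and produces the canonical order by a single sort keyed on a precomputed rank table.
import Mathlib
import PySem

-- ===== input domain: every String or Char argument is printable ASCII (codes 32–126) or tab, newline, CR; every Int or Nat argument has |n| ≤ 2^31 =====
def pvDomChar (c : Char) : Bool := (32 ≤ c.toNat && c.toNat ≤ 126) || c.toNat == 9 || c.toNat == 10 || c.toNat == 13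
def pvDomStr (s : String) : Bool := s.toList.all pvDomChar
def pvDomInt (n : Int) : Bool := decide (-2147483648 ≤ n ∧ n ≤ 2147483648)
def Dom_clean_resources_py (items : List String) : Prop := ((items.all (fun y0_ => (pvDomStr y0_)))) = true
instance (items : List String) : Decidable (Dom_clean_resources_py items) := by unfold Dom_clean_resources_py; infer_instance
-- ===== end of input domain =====

-- B replaces A's canon-scan + dedup-append ordering pass by collecting survivors
-- into a set and sorting once by a precomputed rank table (objective: alternative).

-- ===== PORT A =====
def clean_resources_py (items : List String) : List String :=
  if items = [] then []
  else
    let vocab : PySem.Set String :=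
      PySem.Set.ofList ["oven", "labor", "mixer", "packaging", "machine", "line", "worker", "staff"]
    let out : List String := items.foldl (fun out it =>
      let tok := PySem.Str.lower (PySem.Str.strip it)
      let tok := if PySem.Str.endswith tok "s" && vocab.contains (PySem.Str.slice tok none (some (-1))) then
                   PySem.Str.slice tok none (some (-1))
                 else tok
      if vocab.contains tok && decide (PySem.Str.len tok ≤ 20) && decide ((PySem.Str.split₀ tok).length ≤ 2) then
        out ++ [tok]
      else out) []
    let canon : List String := ["oven","labor","mixer","packaging","line","machine","worker","staff"]
    let ordered := canon.filter (fun r => out.contains r)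
    out.foldl (fun ordered r => if ordered.contains r then ordered else ordered ++ [r]) ordered

-- ===== PORT B =====
def pvCanon : List String := ["oven","labor","mixer","packaging","line","machine","worker","staff"]

-- _RANK = {w: i for i, w in enumerate(_CANON)}
def pvRank : PySem.Dict String Int :=
  (PySem.List.enumerate pvCanon).foldl (fun d p => d.insert p.2 p.1) PySem.Dict.empty

def clean_resources_py_alt (items : List String) : List String :=
  let present : PySem.Set String := items.foldl (fun s it =>
    let tok := PySem.Str.lower (PySem.Str.strip it)
    let tok := if PySem.Str.endswith tok "s" && (pvRank.get? (PySem.Str.slice tok none (some (-1)))).isSome then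
                 PySem.Str.slice tok none (some (-1))
               else tok
    if (pvRank.get? tok).isSome then s.add tok else s) (PySem.Set.ofList [])
  -- sorted(present, key=lambda w: _RANK[w]); the key is only evaluated on members of _RANK,
  -- where get? is some, so the getD default is never the value used
  PySem.List.sorted present (fun w => (pvRank.get? w).getD 0)

-- ===== PRECONDITION & SPEC =====
def Spec_clean_resources_py (items : List String) (out : List String) : Prop := out = clean_resources_py_alt items
instance (items : List String) (out : List String) : Decidable (Spec_clean_resources_py items out) := by unfold Spec_clean_resources_py; infer_instance

-- ===== CLAIM (what is proved, stated in full; the proofs are below) =====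
def Claim_equal_clean_resources_py : Prop := ∀ (items : List String), Dom_clean_resources_py items → Spec_clean_resources_py items (clean_resources_py items)

-- ===== LEMMAS AND PROOFS =====

-- proof-side names for the two loop bodies (definitionally the lambdas in the ports)
def pvStepA (out : List String) (it : String) : List String :=
  let vocab : PySem.Set String :=
    PySem.Set.ofList ["oven", "labor", "mixer", "packaging", "machine", "line", "worker", "staff"]
  let tok := PySem.Str.lower (PySem.Str.strip it)
  let tok := if PySem.Str.endswith tok "s" && vocab.contains (PySem.Str.slice tok none (some (-1))) then
               PySem.Str.slice tok none (some (-1))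
             else tok
  if vocab.contains tok && decide (PySem.Str.len tok ≤ 20) && decide ((PySem.Str.split₀ tok).length ≤ 2) then
    out ++ [tok]
  else out

def pvStepB (s : PySem.Set String) (it : String) : PySem.Set String :=
  let tok := PySem.Str.lower (PySem.Str.strip it)
  let tok := if PySem.Str.endswith tok "s" && (pvRank.get? (PySem.Str.slice tok none (some (-1)))).isSome then
               PySem.Str.slice tok none (some (-1))
             else tok
  if (pvRank.get? tok).isSome then s.add tok else s

-- the cleaned token both loops compute
def pvTok (it : String) : String :=
  let tok := PySem.Str.lower (PySem.Str.strip it)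
  if PySem.Str.endswith tok "s" && (pvRank.get? (PySem.Str.slice tok none (some (-1)))).isSome then
    PySem.Str.slice tok none (some (-1))
  else tok

lemma clean_resources_py_def (items : List String) : clean_resources_py items =
    if items = [] then []
    else
      (items.foldl pvStepA []).foldl (fun ordered r => if ordered.contains r then ordered else ordered ++ [r])
        (pvCanon.filter (fun r => (items.foldl pvStepA []).contains r)) := rfl

lemma clean_resources_py_alt_def (items : List String) : clean_resources_py_alt items =
    PySem.List.sorted (items.foldl pvStepB (PySem.Set.ofList [])) (fun w => (pvRank.get? w).getD 0) := rfl

lemma pvRank_eq : pvRank = PySem.Dict.mk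
    [("oven",0),("labor",1),("mixer",2),("packaging",3),("line",4),("machine",5),("worker",6),("staff",7)] := by
  decide

lemma pvRank_isSome_iff (t : String) : ((pvRank.get? t).isSome = true) ↔ t ∈ pvCanon := by
  rw [pvRank_eq]
  simp [PySem.Dict.get?, List.find?_isSome, pvCanon]
  tauto

lemma pvMem_eq (t : String) :
    (PySem.Set.ofList (["oven", "labor", "mixer", "packaging", "machine", "line", "worker", "staff"] : List String)).contains t
      = (pvRank.get? t).isSome := by
  by_cases h : t ∈ pvCanon
  · rw [Bool.eq_iff_iff]
    simp [PySem.Set.mem_ofList, pvRank_isSome_iff, h]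
    simp [pvCanon] at h
    tauto
  · rw [Bool.eq_iff_iff]
    simp [PySem.Set.mem_ofList, pvRank_isSome_iff, h]
    simp [pvCanon] at h
    tauto

lemma pvGuards (t : String) (h : t ∈ pvCanon) :
    (decide (PySem.Str.len t ≤ 20) && decide ((PySem.Str.split₀ t).length ≤ 2)) = true := by
  simp only [pvCanon, List.mem_cons, List.not_mem_nil, or_false] at h
  rcases h with rfl | rfl | rfl | rfl | rfl | rfl | rfl | rfl <;> decide

lemma pvStepA_eq (out : List String) (it : String) :
    pvStepA out it = (if (pvRank.get? (pvTok it)).isSome then out ++ [pvTok it] else out) := by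
  simp only [pvStepA, pvTok, pvMem_eq]
  cases h : (pvRank.get? (if PySem.Str.endswith (PySem.Str.lower (PySem.Str.strip it)) "s" &&
      (pvRank.get? (PySem.Str.slice (PySem.Str.lower (PySem.Str.strip it)) none (some (-1)))).isSome then
      PySem.Str.slice (PySem.Str.lower (PySem.Str.strip it)) none (some (-1)) else
      PySem.Str.lower (PySem.Str.strip it))).isSome
  · simp only [Bool.false_and, Bool.false_eq_true, if_false]
  · have hg := pvGuards _ ((pvRank_isSome_iff _).mp h)
    simp only [Bool.true_and, hg, if_true]

lemma pvStepB_eq (s : PySem.Set String) (it : String) :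
    pvStepB s it = (if (pvRank.get? (pvTok it)).isSome then s.add (pvTok it) else s) := by
  simp only [pvStepB, pvTok]

lemma pvOfList_append (l : List String) (a : String) :
    PySem.Set.ofList (l ++ [a]) = (PySem.Set.ofList l).add a := by
  simp [PySem.Set.ofList, List.foldl_append]

lemma pvLoop (items : List String) (out : List String) (hsub : ∀ r ∈ out, r ∈ pvCanon) :
    items.foldl pvStepB (PySem.Set.ofList out) = PySem.Set.ofList (items.foldl pvStepA out)
    ∧ ∀ r ∈ items.foldl pvStepA out, r ∈ pvCanon := by
  induction items generalizing out with
  | nil =>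
    rw [List.foldl_nil, List.foldl_nil]
    exact ⟨rfl, hsub⟩
  | cons it items ih =>
    by_cases h : (pvRank.get? (pvTok it)).isSome = true
    · have hsub' : ∀ r ∈ out ++ [pvTok it], r ∈ pvCanon := by
        intro r hr
        rcases List.mem_append.mp hr with hr | hr
        · exact hsub r hr
        · rw [List.mem_singleton] at hr
          rw [hr]
          exact (pvRank_isSome_iff _).mp h
      have hrec := ih (out ++ [pvTok it]) hsub'
      rw [List.foldl_cons, List.foldl_cons, pvStepA_eq, pvStepB_eq, if_pos h, if_pos h,
        ← pvOfList_append]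
      exact hrec
    · have hrec := ih out hsub
      rw [List.foldl_cons, List.foldl_cons, pvStepA_eq, pvStepB_eq, if_neg h, if_neg h]
      exact hrec

lemma pvTail (out ordered : List String) (h : ∀ r ∈ out, ordered.contains r = true) :
    out.foldl (fun o r => if o.contains r then o else o ++ [r]) ordered = ordered := by
  induction out with
  | nil => rfl
  | cons r out ih =>
    simp only [List.foldl_cons, h r (List.mem_cons_self)]
    simp only [if_true]
    exact ih (fun r hr => h r (List.mem_cons_of_mem _ hr))

lemma pvSorted (out : List String) (hsub : ∀ r ∈ out, r ∈ pvCanon) :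
    PySem.List.sorted (PySem.Set.ofList out) (fun w => (pvRank.get? w).getD 0)
      = pvCanon.filter (fun r => out.contains r) := by
  apply PySem.List.sorted_eq_of_perm_of_pairwise_lt
  · rw [List.perm_ext_iff_of_nodup (List.Nodup.filter _ (by decide)) (PySem.Set.nodup_ofList out)]
    intro a
    simp only [List.mem_filter, PySem.Set.mem_ofList, List.contains_iff_mem]
    constructor
    · rintro ⟨-, ha⟩; exact ha
    · intro ha; exact ⟨hsub a ha, ha⟩
  · exact List.Pairwise.filter _ (by decide)

-- ===== VERDICT (by name: the statement is the Claim_ definition above) =====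
theorem clean_resources_py_spec : Claim_equal_clean_resources_py := by
  intro items _
  unfold Spec_clean_resources_py
  rw [clean_resources_py_def, clean_resources_py_alt_def]
  obtain ⟨hfold, hsub⟩ := pvLoop items [] (by simp)
  rw [hfold, pvSorted _ hsub]
  by_cases hne : items = []
  · subst hne; rfl
  · simp only [hne, if_false]
    apply pvTail
    intro r hr
    simp only [List.contains_iff_mem, List.mem_filter]
    exact ⟨hsub r hr, by simp [hr]⟩
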